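-- pv_equiv track=rewrite | github.com/codyrobertson/script_fury_production | sf_simple/utils/scene_analyzer.py | extract_character_context
-- ===== SOURCE A (Python) =====
-- def extract_character_context(text: str, character: str) -> str:
--     """Extract basic visual context for a character from screenplay text"""
--     # Look for descriptions near character name mentions
--     lines = text.split('\n')
--     char_descriptions = []
--
--     for i, line in enumerate(lines):
--         if character.upper() in line.upper():
--             # Look at surrounding lines for descriptions
--             context_start = max(0, i - 3)
--             context_end = min(len(lines), i + 3)
--             context_lines = lines[context_start:context_end]
--
--             for context_line in context_lines:
--                 # Look for descriptive text (usually in parentheses or action lines)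
--                 if any(word in context_line.lower() for word in
--                       ['young', 'old', 'tall', 'short', 'beard', 'hair', 'wearing', 'dressed',
--                        'looks', 'appears', 'age', 'years', 'man', 'woman', 'boy', 'girl']):
--                     char_descriptions.append(context_line.strip())
--
--     if char_descriptions:
--         # Return the most descriptive line
--         best_description = max(char_descriptions, key=len)
--         return f"Character: {best_description[:100]}..."
--     else:
--         # Fallback description based on character name
--         return f"Character appearing in screenplay: {character}"
-- ===== SOURCE B (Python) =====
-- _KEYWORDS = ['young', 'old', 'tall', 'short', 'beard', 'hair', 'wearing', 'dressed',
--              'looks', 'appears', 'age', 'years', 'man', 'woman', 'boy', 'girl']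
--
--
-- def extract_character_context(text: str, character: str) -> str:
--     """Extract basic visual context for a character from screenplay text"""
--     lines = text.split('\n')
--     char_upper = character.upper()
--     # One pass: collect the set of line indices that mention the character.
--     mentions = {i for i, line in enumerate(lines) if char_upper in line.upper()}
--     # One pass: keep the longest descriptive line within the asymmetric
--     # window [j-2, j+3] of a mention (ties go to the earliest line).
--     best = None
--     for j, line in enumerate(lines):
--         if any((j + d) in mentions for d in range(-2, 4)):
--             low = line.lower()
--             if any(word in low for word in _KEYWORDS):
--                 stripped = line.strip()
--                 if best is None or len(stripped) > len(best):
--                     best = stripped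
--     if best is not None:
--         return f"Character: {best[:100]}..."
--     return f"Character appearing in screenplay: {character}"
-- ===== Notes on version B (the rewrite author's own statement) =====
-- stated objective: alternative
-- what changed: A rescans a 5-line window around every character mention (re-testing keywords and feeding duplicate candidates to max); B collects the mention-index set in one pass and then makes a single pass over the lines, keeping the longest keyword line whose window [j-2,j+3] hits a mention, so each line is keyword-tested once and no candidate list is built.
import Mathlib
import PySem

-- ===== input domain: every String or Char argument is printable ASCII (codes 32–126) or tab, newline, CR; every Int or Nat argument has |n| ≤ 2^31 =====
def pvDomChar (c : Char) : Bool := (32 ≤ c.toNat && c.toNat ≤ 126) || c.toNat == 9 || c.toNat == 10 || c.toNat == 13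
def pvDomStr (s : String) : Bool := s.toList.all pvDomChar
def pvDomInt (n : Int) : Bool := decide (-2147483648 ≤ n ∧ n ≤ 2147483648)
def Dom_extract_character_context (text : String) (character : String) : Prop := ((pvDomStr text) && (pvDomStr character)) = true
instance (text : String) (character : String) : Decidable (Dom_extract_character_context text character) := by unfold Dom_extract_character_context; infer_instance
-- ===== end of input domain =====

-- B replaces A's per-mention rescan of a window of surrounding lines (which feeds duplicate
-- candidates to max) by one pass collecting the mention-index set and one pass keeping the
-- longest keyword line whose asymmetric window [j-2, j+3] hits a mention; same return value.

def pvKeywords : List String :=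
  ["young", "old", "tall", "short", "beard", "hair", "wearing", "dressed",
   "looks", "appears", "age", "years", "man", "woman", "boy", "girl"]

-- ===== PORT A =====
def extract_character_context (text : String) (character : String) : String :=
  let lines := (PySem.Str.split? text "\n").getD []
  let char_descriptions :=
    (PySem.List.enumerate lines).foldl (fun acc p =>
      if PySem.Str.isIn (PySem.Str.upper character) (PySem.Str.upper p.2) then
        let context_start := max 0 (p.1 - 3)
        let context_end := min (PySem.List.len lines) (p.1 + 3)
        let context_lines := PySem.List.slice lines (some context_start) (some context_end)
        context_lines.foldl (fun acc2 context_line =>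
          if pvKeywords.any (fun w => PySem.Str.isIn w (PySem.Str.lower context_line)) then
            acc2 ++ [PySem.Str.strip context_line]
          else acc2) acc
      else acc) ([] : List String)
  match PySem.List.max? char_descriptions PySem.Str.len with
  | some best => "Character: " ++ PySem.Str.slice best none (some 100) ++ "..."
  | none => "Character appearing in screenplay: " ++ character

-- ===== PORT B =====
def extract_character_context_alt (text : String) (character : String) : String :=
  let lines := (PySem.Str.split? text "\n").getD []
  let charUpper := PySem.Str.upper character
  let mentions := PySem.Set.ofList
    (((PySem.List.enumerate lines).filter
        (fun p => PySem.Str.isIn charUpper (PySem.Str.upper p.2))).map (·.1))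
  let best := (PySem.List.enumerate lines).foldl (fun (best : Option String) p =>
      if (PySem.List.pyRange (-2) 4).any (fun d => mentions.contains (p.1 + d)) then
        if pvKeywords.any (fun w => PySem.Str.isIn w (PySem.Str.lower p.2)) then
          let stripped := PySem.Str.strip p.2
          match best with
          | none => some stripped
          | some b => if PySem.Str.len stripped > PySem.Str.len b then some stripped else some b
        else best
      else best) none
  match best with
  | some b => "Character: " ++ PySem.Str.slice b none (some 100) ++ "..."
  | none => "Character appearing in screenplay: " ++ character

-- ===== PRECONDITION & SPEC =====
def Spec_extract_character_context (text : String) (character : String) (out : String) : Prop := out = extract_character_context_alt text character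
instance (text : String) (character : String) (out : String) : Decidable (Spec_extract_character_context text character out) := by unfold Spec_extract_character_context; infer_instance

-- ===== CLAIM (what is proved, stated in full; the proofs are below) =====
def Claim_equal_extract_character_context : Prop := ∀ (text : String) (character : String), Dom_extract_character_context text character → Spec_extract_character_context text character (extract_character_context text character)

-- ===== LEMMAS AND PROOFS =====

-- proof-only abbreviations (index-level views of the two programs)

def pvKb (lines : List String) (j : Int) : Bool :=
  pvKeywords.any (fun w => PySem.Str.isIn w (PySem.Str.lower (PySem.List.pyGetD lines j "")))

def pvFs (lines : List String) (j : Int) : String :=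
  PySem.Str.strip (PySem.List.pyGetD lines j "")

def pvM (lines : List String) (character : String) : List Int :=
  (PySem.List.pyRange 0 (PySem.List.len lines)).filter
    (fun i => PySem.Str.isIn (PySem.Str.upper character) (PySem.Str.upper (PySem.List.pyGetD lines i "")))

def pvBlk (lines : List String) (character : String) (i : Int) : List Int :=
  (PySem.List.pyRange (max 0 (i - 3)) (min (PySem.List.len lines) (i + 3))).filter (pvKb lines)

def pvJ (lines : List String) (character : String) : List Int :=
  (pvM lines character).flatMap (pvBlk lines character)

def pvC (lines : List String) (character : String) : List Int :=
  (PySem.List.pyRange 0 (PySem.List.len lines)).filter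
    (fun j => ((PySem.List.pyRange (-2) 4).any (fun d => decide ((j + d) ∈ pvM lines character))
               && pvKb lines j))

def pvPick (key : Int → Int) (acc : Option Int) (j : Int) : Option Int :=
  match acc with
  | none => some j
  | some m => if key m < key j then some j else some m

def pvKey (lines : List String) (j : Int) : Int := PySem.Str.len (pvFs lines j)

def pvRender (lines : List String) (character : String) (o : Option Int) : String :=
  match o.map (pvFs lines) with
  | some b => "Character: " ++ PySem.Str.slice b none (some 100) ++ "..."
  | none => "Character appearing in screenplay: " ++ character

-- slice with in-range natural bounds is a map over the index range
theorem pv_slice_eq_map_pyRange {α : Type} (xs : List α) (d : α) (a b : Int)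
    (ha : 0 ≤ a) (hb0 : 0 ≤ b) (hb : b ≤ (xs.length : Int)) :
    PySem.List.slice xs (some a) (some b) =
      (PySem.List.pyRange a b).map (fun j => PySem.List.pyGetD xs j d) := by
  rw [PySem.List.slice_toNat xs ha hb0]
  apply List.ext_getElem
  · simp [PySem.List.length_pyRange_one]
    omega
  · intro k h1 h2
    simp only [List.getElem_map, PySem.List.getElem_pyRange_one, List.getElem_take,
      List.getElem_drop]
    rw [PySem.List.pyGetD_eq_getElem xs d (by omega)
      (by simp [PySem.List.length_pyRange_one] at h1; omega)]
    congr 1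
    simp [PySem.List.length_pyRange_one] at h1
    omega

-- 'if p then acc ++ q i else acc' loop is filter + flatMap
theorem pv_foldl_if_append {α β : Type} (p : α → Bool) (q : α → List β) (l : List α) (acc : List β) :
    l.foldl (fun acc i => if p i then acc ++ q i else acc) acc
      = acc ++ (l.filter p).flatMap q := by
  induction l generalizing acc with
  | nil => simp
  | cons x t ih =>
    by_cases h : p x = true
    · simp [h, ih, List.flatMap_cons]
    · simp [h] at *
      simp [h, ih]

-- the running-max fold commutes with mapping the index to its string
def pvPickS (acc : Option String) (x : String) : Option String :=
  match acc with
  | none => some x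
  | some m => if PySem.Str.len m < PySem.Str.len x then some x else some m

theorem pv_pick_map_aux (lines : List String) (L : List Int) (a : Option Int) :
    (L.map (pvFs lines)).foldl pvPickS (a.map (pvFs lines))
      = (L.foldl (pvPick (pvKey lines)) a).map (pvFs lines) := by
  induction L generalizing a with
  | nil => simp
  | cons x t ih =>
    cases a with
    | none => simpa using ih (some x)
    | some m =>
      simp only [List.map_cons, List.foldl_cons, pvPick, pvPickS, pvKey, Option.map_some]
      split_ifs
      · simpa using ih (some x)
      · simpa using ih (some m)

theorem pv_max_map (lines : List String) (L : List Int) :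
    PySem.List.max? (L.map (pvFs lines)) PySem.Str.len
      = (L.foldl (pvPick (pvKey lines)) none).map (pvFs lines) := by
  have h := pv_pick_map_aux lines L none
  simp only [Option.map_none] at h
  rw [← h]
  unfold PySem.List.max?
  exact PySem.List.foldl_congr_mem _ _ _ _ (fun acc x _ => by cases acc <;> rfl)

theorem pv_pick_some (key : Int → Int) (L : List Int) (a : Int) :
    ∃ r, L.foldl (pvPick key) (some a) = some r := by
  induction L generalizing a with
  | nil => exact ⟨a, rfl⟩
  | cons x t ih =>
    simp only [List.foldl_cons, pvPick]
    split_ifs <;> exact ih _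

theorem pv_pick_aux (key : Int → Int) (L : List Int) (a r : Int)
    (h : L.foldl (pvPick key) (some a) = some r) :
    (r = a ∧ ∀ y ∈ L, key y ≤ key a) ∨
      (∃ l1 l2, L = l1 ++ r :: l2 ∧ key a < key r ∧
        (∀ y ∈ l1, key y < key r) ∧ (∀ y ∈ l2, key y ≤ key r)) := by
  induction L generalizing a with
  | nil => simp at h; simp [h]
  | cons x t ih =>
    simp only [List.foldl_cons, pvPick] at h
    by_cases hx : key a < key x
    · rw [if_pos hx] at h
      rcases ih x h with ⟨rfl, hall⟩ | ⟨l1, l2, rfl, hlt, h1, h2⟩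
      · exact Or.inr ⟨[], t, rfl, hx, by simp, hall⟩
      · exact Or.inr ⟨x :: l1, l2, rfl, lt_trans hx hlt,
          by intro y hy; rcases List.mem_cons.mp hy with rfl | hy; exact hlt; exact h1 y hy, h2⟩
    · rw [if_neg hx] at h
      rw [not_lt] at hx
      rcases ih a h with ⟨rfl, hall⟩ | ⟨l1, l2, rfl, hlt, h1, h2⟩
      · exact Or.inl ⟨rfl, by intro y hy; rcases List.mem_cons.mp hy with rfl | hy; exact hx; exact hall y hy⟩
      · exact Or.inr ⟨x :: l1, l2, rfl, hlt,
          by intro y hy; rcases List.mem_cons.mp hy with rfl | hy; exact lt_of_le_of_lt hx hlt; exact h1 y hy, h2⟩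

theorem pv_pick_char (key : Int → Int) (L : List Int) (r : Int)
    (h : L.foldl (pvPick key) none = some r) :
    ∃ l1 l2, L = l1 ++ r :: l2 ∧ (∀ y ∈ l1, key y < key r) ∧ (∀ y ∈ l2, key y ≤ key r) := by
  cases L with
  | nil => simp at h
  | cons x t =>
    simp only [List.foldl_cons, pvPick] at h
    rcases pv_pick_aux key t x r h with ⟨rfl, hall⟩ | ⟨l1, l2, rfl, hlt, h1, h2⟩
    · exact ⟨[], t, rfl, by simp, hall⟩
    · exact ⟨x :: l1, l2, rfl,
        by intro y hy; rcases List.mem_cons.mp hy with rfl | hy; exact hlt; exact h1 y hy, h2⟩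

-- the core: the fold over A's mention-major candidate list equals the fold over B's sorted list
theorem pv_core (key : Int → Int) (J C : List Int)
    (hmem : ∀ j, j ∈ J ↔ j ∈ C) (hC : C.Pairwise (· < ·))
    (hQ : ∀ l1 x l2, J = l1 ++ x :: l2 → ∀ y ∈ l2, y < x → y ∈ l1) :
    J.foldl (pvPick key) none = C.foldl (pvPick key) none := by
  cases hJ : J.foldl (pvPick key) none with
  | none =>
    have hJnil : J = [] := by
      cases hJl : J with
      | nil => rfl
      | cons x t =>
        exfalso
        obtain ⟨r, hr⟩ := pv_pick_some key t x
        rw [hJl, List.foldl_cons] at hJ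
        simp only [pvPick] at hJ
        rw [hr] at hJ
        simp at hJ
    have hCnil : C = [] := by
      cases hCl : C with
      | nil => rfl
      | cons y t =>
        exfalso
        have : y ∈ J := (hmem y).mpr (by rw [hCl]; simp)
        rw [hJnil] at this
        simp at this
    rw [hCnil]
    rfl
  | some rJ =>
    obtain ⟨j1, j2, hJd, hj1, hj2⟩ := pv_pick_char key J rJ hJ
    have hCne : C ≠ [] := by
      intro hc
      have : rJ ∈ C := (hmem rJ).mp (by rw [hJd]; simp)
      rw [hc] at this
      simp at this
    cases hCf : C.foldl (pvPick key) none with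
    | none =>
      exfalso
      cases hCl : C with
      | nil => exact hCne hCl
      | cons y t =>
        obtain ⟨r, hr⟩ := pv_pick_some key t y
        rw [hCl, List.foldl_cons] at hCf
        simp only [pvPick] at hCf
        rw [hr] at hCf
        simp at hCf
    | some rC =>
      obtain ⟨c1, c2, hCd, hc1, hc2⟩ := pv_pick_char key C rC hCf
      have hmaxJ : ∀ y ∈ J, key y ≤ key rJ := by
        rw [hJd]
        intro y hy
        rcases List.mem_append.mp hy with hy | hy
        · exact le_of_lt (hj1 y hy)
        · rcases List.mem_cons.mp hy with rfl | hy
          · exact le_refl _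
          · exact hj2 y hy
      have hmaxC : ∀ y ∈ C, key y ≤ key rC := by
        rw [hCd]
        intro y hy
        rcases List.mem_append.mp hy with hy | hy
        · exact le_of_lt (hc1 y hy)
        · rcases List.mem_cons.mp hy with rfl | hy
          · exact le_refl _
          · exact hc2 y hy
      have hrJC : rJ ∈ C := (hmem rJ).mp (by rw [hJd]; simp)
      have hrCJ : rC ∈ J := (hmem rC).mpr (by rw [hCd]; simp)
      have hkey : key rJ = key rC := le_antisymm (hmaxC rJ hrJC) (hmaxJ rC hrCJ)
      by_cases heq : rC = rJ
      · rw [heq]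
      · exfalso
        have hrCj2 : rC ∈ j2 := by
          rw [hJd] at hrCJ
          rcases List.mem_append.mp hrCJ with hy | hy
          · exact absurd (hj1 rC hy) (by rw [hkey]; exact lt_irrefl _)
          · rcases List.mem_cons.mp hy with h | h
            · exact absurd h heq
            · exact h
        have hrJc2 : rJ ∈ c2 := by
          rw [hCd] at hrJC
          rcases List.mem_append.mp hrJC with hy | hy
          · exact absurd (hc1 rJ hy) (by rw [← hkey]; exact lt_irrefl _)
          · rcases List.mem_cons.mp hy with h | h
            · exact absurd h.symm heq
            · exact h
        have hlt : rC < rJ := by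
          rw [hCd] at hC
          have h2 := (List.pairwise_append.mp hC).2.1
          exact (List.pairwise_cons.mp h2).1 rJ hrJc2
        have : rC ∈ j1 := hQ j1 rJ j2 hJd rC hrCj2 hlt
        exact absurd (hj1 rC this) (by rw [hkey]; exact lt_irrefl _)

theorem pv_flatMap_decomp (m : List Int) (g : Int → List Int) (l1 : List Int) (x : Int) (l2 : List Int)
    (h : m.flatMap g = l1 ++ x :: l2) :
    ∃ m1 i m2 b1 b2, m = m1 ++ i :: m2 ∧ g i = b1 ++ x :: b2 ∧
      l1 = m1.flatMap g ++ b1 ∧ l2 = b2 ++ m2.flatMap g := by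
  induction m generalizing l1 with
  | nil => simp at h
  | cons i t ih =>
    rw [List.flatMap_cons] at h
    rcases List.append_eq_append_iff.mp h with ⟨as, h1, h2⟩ | ⟨bs, h1, h2⟩
    · rcases ih as h2 with ⟨m1, i', m2, b1, b2, hm, hg, hl1, hl2⟩
      exact ⟨i :: m1, i', m2, b1, b2, by rw [hm]; rfl, hg,
        by rw [h1, hl1, List.flatMap_cons, List.append_assoc], hl2⟩
    · cases bs with
      | nil =>
        simp at h1 h2
        rcases ih [] h2.symm with ⟨m1, i', m2, b1, b2, hm, hg, hl1, hl2⟩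
        refine ⟨i :: m1, i', m2, b1, b2, by rw [hm]; rfl, hg, ?_, hl2⟩
        have h01 : List.flatMap g m1 = [] ∧ b1 = [] :=
          ⟨(List.append_eq_nil_iff.mp hl1.symm).1, (List.append_eq_nil_iff.mp hl1.symm).2⟩
        rw [List.flatMap_cons, h01.1, h01.2, ← h1]
        simp
      | cons c bs' =>
        have hc : c = x ∧ l2 = bs' ++ t.flatMap g := by
          have := h2
          simp at this
          exact ⟨this.1.symm, this.2⟩
        exact ⟨[], i, t, l1, bs', rfl, by rw [h1, hc.1], by simp, hc.2⟩

theorem pv_mem_blk (lines : List String) (character : String) (i j : Int) :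
    j ∈ pvBlk lines character i ↔
      (i - 3 ≤ j ∧ 0 ≤ j ∧ j < (lines.length : Int) ∧ j < i + 3 ∧ pvKb lines j = true) := by
  simp only [pvBlk, List.mem_filter, PySem.List.mem_pyRange_one, max_le_iff, lt_min_iff,
    PySem.List.len]
  constructor
  · rintro ⟨⟨⟨h1, h2⟩, h3, h4⟩, h5⟩
    exact ⟨h2, h1, h3, h4, h5⟩
  · rintro ⟨h1, h2, h3, h4, h5⟩
    exact ⟨⟨⟨h2, h1⟩, h3, h4⟩, h5⟩

theorem pv_Q (lines : List String) (character : String) :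
    ∀ l1 x l2, pvJ lines character = l1 ++ x :: l2 → ∀ y ∈ l2, y < x → y ∈ l1 := by
  intro l1 x l2 h y hy hlt
  obtain ⟨m1, i, m2, b1, b2, hm, hgi, hl1, hl2⟩ :=
    pv_flatMap_decomp (pvM lines character) (pvBlk lines character) l1 x l2 h
  have pwBlk : ∀ k, (pvBlk lines character k).Pairwise (· < ·) :=
    fun k => List.Pairwise.filter _ (PySem.List.pairwise_lt_pyRange_one _ _)
  have hxblk : x ∈ pvBlk lines character i := by rw [hgi]; simp
  rw [hl2] at hy
  rcases List.mem_append.mp hy with hyb | hyrest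
  · exfalso
    have := pwBlk i
    rw [hgi] at this
    have h2 := (List.pairwise_append.mp this).2.1
    have := (List.pairwise_cons.mp h2).1 y hyb
    omega
  · obtain ⟨i', hi', hyblk⟩ := List.mem_flatMap.mp hyrest
    have pwM : (pvM lines character).Pairwise (· < ·) :=
      List.Pairwise.filter _ (PySem.List.pairwise_lt_pyRange_one _ _)
    have hii' : i < i' := by
      rw [hm] at pwM
      have h2 := (List.pairwise_append.mp pwM).2.1
      exact (List.pairwise_cons.mp h2).1 i' hi'
    have hyi : y ∈ pvBlk lines character i := by
      rw [pv_mem_blk] at hyblk ⊢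
      rw [pv_mem_blk] at hxblk
      exact ⟨by omega, hyblk.2.1, hyblk.2.2.1, by omega, hyblk.2.2.2.2⟩
    rw [hgi] at hyi
    rcases List.mem_append.mp hyi with hyb1 | hyc
    · rw [hl1]
      exact List.mem_append.mpr (Or.inr hyb1)
    · exfalso
      rcases List.mem_cons.mp hyc with rfl | hyb2
      · omega
      · have := pwBlk i
        rw [hgi] at this
        have h2 := (List.pairwise_append.mp this).2.1
        have := (List.pairwise_cons.mp h2).1 y hyb2
        omega

theorem pv_memJC (lines : List String) (character : String) (j : Int) :
    j ∈ pvJ lines character ↔ j ∈ pvC lines character := by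
  simp only [pvJ, List.mem_flatMap, pvC, List.mem_filter, PySem.List.mem_pyRange_one,
    Bool.and_eq_true, List.any_eq_true, decide_eq_true_eq, PySem.List.len]
  constructor
  · rintro ⟨i, hiM, hblk⟩
    rw [pv_mem_blk] at hblk
    obtain ⟨h1, h2, h3, h4, h5⟩ := hblk
    exact ⟨⟨h2, h3⟩, ⟨⟨i - j, by omega, by
      rw [show j + (i - j) = i by ring]; exact hiM⟩, h5⟩⟩
  · rintro ⟨⟨h0, hn⟩, ⟨d, hd, hdM⟩, hkb⟩
    refine ⟨j + d, hdM, ?_⟩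
    rw [pv_mem_blk]
    exact ⟨by omega, h0, hn, by omega, hkb⟩

theorem pv_descs (lines : List String) (character : String) :
    (PySem.List.enumerate lines).foldl (fun acc p =>
        if PySem.Str.isIn (PySem.Str.upper character) (PySem.Str.upper p.2) then
          (PySem.List.slice lines (some (max 0 (p.1 - 3)))
              (some (min (PySem.List.len lines) (p.1 + 3)))).foldl
            (fun acc2 context_line =>
              if pvKeywords.any (fun w => PySem.Str.isIn w (PySem.Str.lower context_line)) then
                acc2 ++ [PySem.Str.strip context_line]
              else acc2) acc
        else acc) ([] : List String)
      = (pvJ lines character).map (pvFs lines) := by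
  rw [PySem.List.enumerate_eq_map_pyRange lines "", List.foldl_map]
  have hbody : ∀ (acc : List String) (j : Int), j ∈ PySem.List.pyRange 0 (PySem.List.len lines) →
      (if PySem.Str.isIn (PySem.Str.upper character) (PySem.Str.upper (PySem.List.pyGetD lines j "")) then
        (PySem.List.slice lines (some (max 0 (j - 3)))
            (some (min (PySem.List.len lines) (j + 3)))).foldl
          (fun acc2 context_line =>
            if pvKeywords.any (fun w => PySem.Str.isIn w (PySem.Str.lower context_line)) then
              acc2 ++ [PySem.Str.strip context_line]
            else acc2) acc
      else acc)
      = (if PySem.Str.isIn (PySem.Str.upper character) (PySem.Str.upper (PySem.List.pyGetD lines j "")) then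
          acc ++ (pvBlk lines character j).map (pvFs lines) else acc) := by
    intro acc j hj
    rw [PySem.List.mem_pyRange_one] at hj
    simp only [PySem.List.len] at hj
    split_ifs with h
    · rw [PySem.List.foldl_append_if
        (fun context_line => pvKeywords.any (fun w => PySem.Str.isIn w (PySem.Str.lower context_line)))
        PySem.Str.strip]
      congr 1
      rw [pv_slice_eq_map_pyRange lines "" _ _ (le_max_left 0 _)
        (by simp only [PySem.List.len]; omega) (by simp only [PySem.List.len]; omega)]
      rw [List.filter_map, List.map_map]
      rfl
    · rfl
  rw [PySem.List.foldl_congr_mem _ _ _ _ hbody]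
  rw [pv_foldl_if_append]
  rw [List.nil_append, ← List.map_flatMap]
  rfl

theorem pv_A_eq (text character : String) :
    extract_character_context text character =
      pvRender ((PySem.Str.split? text "\n").getD []) character
        ((pvJ ((PySem.Str.split? text "\n").getD []) character).foldl
          (pvPick (pvKey ((PySem.Str.split? text "\n").getD []))) none) := by
  simp only [extract_character_context]
  rw [pv_descs, pv_max_map]
  rfl

theorem pv_mlist (lines : List String) (character : String) :
    ((PySem.List.enumerate lines).filter
        (fun p => PySem.Str.isIn (PySem.Str.upper character) (PySem.Str.upper p.2))).map (·.1)
      = pvM lines character := by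
  rw [PySem.List.enumerate_eq_map_pyRange lines "", List.filter_map, List.map_map]
  simp only [Function.comp_def]
  exact List.map_id' _

theorem pv_contains_eq (M : List Int) (x : Int) :
    (PySem.Set.ofList M).contains x = decide (x ∈ M) := by
  rw [Bool.eq_iff_iff, PySem.Set.contains_iff, PySem.Set.mem_ofList, decide_eq_true_eq]

theorem pv_B_eq (text character : String) :
    extract_character_context_alt text character =
      pvRender ((PySem.Str.split? text "\n").getD []) character
        ((pvC ((PySem.Str.split? text "\n").getD []) character).foldl
          (pvPick (pvKey ((PySem.Str.split? text "\n").getD []))) none) := by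
  simp only [extract_character_context_alt]
  rw [pv_mlist]
  set lines := (PySem.Str.split? text "\n").getD [] with hlines
  rw [PySem.List.enumerate_eq_map_pyRange lines "", List.foldl_map]
  rw [PySem.List.foldl_congr_mem _ _
    (fun (best : Option String) (j : Int) =>
      if ((PySem.List.pyRange (-2) 4).any (fun d => decide ((j + d) ∈ pvM lines character))
          && pvKb lines j) then pvPickS best (pvFs lines j) else best) _
    (by
      intro acc j _
      simp only [pv_contains_eq]
      cases hb : (PySem.List.pyRange (-2) 4).any
          (fun d => decide ((j + d) ∈ pvM lines character)) with
      | false => simp [hb]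
      | true =>
        cases hk : pvKeywords.any
            (fun w => PySem.Str.isIn w (PySem.Str.lower (PySem.List.pyGetD lines j ""))) with
        | false =>
          have hk' : pvKb lines j = false := hk
          simp [hb, hk, hk']
        | true =>
          have hk' : pvKb lines j = true := hk
          simp only [hb, hk, hk', Bool.true_and, if_true, if_pos]
          cases acc <;> rfl)]
  rw [← List.foldl_filter, ← List.foldl_map]
  have h := pv_pick_map_aux lines
    ((PySem.List.pyRange 0 (PySem.List.len lines)).filter
      (fun j => ((PySem.List.pyRange (-2) 4).any (fun d => decide ((j + d) ∈ pvM lines character))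
                 && pvKb lines j))) none
  simp only [Option.map_none] at h
  rw [h]
  rfl

-- ===== VERDICT (by name: the statement is the Claim_ definition above) =====
theorem extract_character_context_spec : Claim_equal_extract_character_context := by
  intro text character _
  unfold Spec_extract_character_context
  rw [pv_A_eq, pv_B_eq,
    pv_core _ _ _ (pv_memJC _ _) (List.Pairwise.filter _ (PySem.List.pairwise_lt_pyRange_one 0 _)) (pv_Q _ _)]
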